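-- pv_equiv track=rewrite | github.com/MassimoLauria/infosefa2018 | src/code/lab03.py | n_righe_tabella
-- ===== SOURCE A (Python) =====
-- def n_righe_tabella(tabella):
--     rows=None
--     for v in tabella.values():
--         if rows is None:
--             rows=len(v)
--         elif rows!=len(v):
--             raise ValueError("la tabella ha colonne di lunghezza diversa")
--     if rows is None:
--         raise ValueError("la tabella non ha campi")
--
--     return rows
-- ===== SOURCE B (Python) =====
-- def n_righe_tabella(tabella):
--     lengths = {len(v) for v in tabella.values()}
--     if not lengths:
--         raise ValueError("la tabella non ha campi")
--     if len(lengths) > 1: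
--         raise ValueError("la tabella ha colonne di lunghezza diversa")
--     return next(iter(lengths))
-- ===== Notes on version B (the rewrite author's own statement) =====
-- stated objective: simpler
-- what changed: Replaces the incremental carry-and-compare loop over values with a collect-then-classify strategy: build the set of all column lengths once and decide by its cardinality (0 -> no fields, >1 -> unequal columns, 1 -> that length).
import Mathlib
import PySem

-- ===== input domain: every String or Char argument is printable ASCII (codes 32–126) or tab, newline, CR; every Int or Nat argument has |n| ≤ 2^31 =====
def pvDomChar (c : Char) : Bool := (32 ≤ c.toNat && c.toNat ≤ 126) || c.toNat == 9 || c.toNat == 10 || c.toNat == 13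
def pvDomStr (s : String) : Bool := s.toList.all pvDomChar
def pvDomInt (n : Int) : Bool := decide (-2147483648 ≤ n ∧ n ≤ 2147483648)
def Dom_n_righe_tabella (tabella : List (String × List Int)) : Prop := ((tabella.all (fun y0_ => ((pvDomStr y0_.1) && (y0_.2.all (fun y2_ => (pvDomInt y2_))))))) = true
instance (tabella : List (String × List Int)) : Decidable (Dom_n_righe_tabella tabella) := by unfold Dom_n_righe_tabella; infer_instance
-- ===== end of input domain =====

-- B replaces A's carry-and-compare loop by collecting the set of column lengths and classifying by its cardinality (simpler decomposition, same cost).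


-- ===== PORT A =====
-- A's loop: carry 'rows' (None at first), compare each value's length; raise (→ none) on mismatch or if still None at the end.
def nrtAux : Option Int → List (String × List Int) → Option Int
  | rows, [] => rows
  | none, (_, v) :: rest => nrtAux (some (v.length : Int)) rest
  | some r, (_, v) :: rest =>
      if r ≠ (v.length : Int) then none else nrtAux (some r) rest

def n_righe_tabella (tabella : List (String × List Int)) : Int :=
  (nrtAux none tabella).getD 0  -- none = ValueError, excluded by Pre_

-- ===== PORT B =====
-- B: set of all column lengths; classify by cardinality (0 or >1 = ValueError, excluded by Pre_).
def n_righe_tabella_alt (tabella : List (String × List Int)) : Int :=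
  let lengths : PySem.Set Int := PySem.Set.ofList (tabella.map (fun kv => (kv.2.length : Int)))
  if lengths = [] then 0            -- raise ValueError "la tabella non ha campi"
  else if 1 < PySem.Set.len lengths then 0  -- raise ValueError "la tabella ha colonne di lunghezza diversa"
  else lengths.headD 0

-- ===== PRECONDITION & SPEC =====
-- Pre_ excludes exactly the inputs where A raises ValueError: the empty table and tables with columns of unequal length.
def Pre_n_righe_tabella (tabella : List (String × List Int)) : Prop :=
  tabella ≠ [] ∧ ∀ kv ∈ tabella, kv.2.length = (tabella.headD ("", [])).2.length

instance (tabella : List (String × List Int)) : Decidable (Pre_n_righe_tabella tabella) := by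
  unfold Pre_n_righe_tabella; infer_instance

def pvWitness_n_righe_tabella : (List (String × List Int)) := [("a", [1, 2]), ("b", [3, 4])]

def Spec_n_righe_tabella (tabella : List (String × List Int)) (out : Int) : Prop := out = n_righe_tabella_alt tabella
instance (tabella : List (String × List Int)) (out : Int) : Decidable (Spec_n_righe_tabella tabella out) := by unfold Spec_n_righe_tabella; infer_instance

-- ===== CLAIM (what is proved, stated in full; the proofs are below) =====
def Claim_equal_n_righe_tabella : Prop := ∀ (tabella : List (String × List Int)), Dom_n_righe_tabella tabella → Pre_n_righe_tabella tabella → Spec_n_righe_tabella tabella (n_righe_tabella tabella)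

-- ===== LEMMAS AND PROOFS =====
theorem nrtAux_const (L : Int) (rest : List (String × List Int))
    (h : ∀ kv ∈ rest, (kv.2.length : Int) = L) : nrtAux (some L) rest = some L := by
  induction rest with
  | nil => rfl
  | cons kv rest ih =>
      obtain ⟨k, v⟩ := kv
      have hv : (v.length : Int) = L := h (k, v) (by simp)
      simp [nrtAux, hv]
      exact ih (fun kv hkv => h kv (by simp [hkv]))

theorem foldl_add_const (L : Int) (ls : List Int) (h : ∀ x ∈ ls, x = L) :
    ls.foldl PySem.Set.add [L] = [L] := by
  induction ls with
  | nil => rfl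
  | cons x ls ih =>
      have hx : x = L := h x (by simp)
      subst hx
      simp only [List.foldl_cons, PySem.Set.add]
      have : PySem.Set.contains [x] x = true := by simp [PySem.Set.contains]
      rw [if_pos this]
      exact ih (fun y hy => h y (by simp [hy]))

theorem n_righe_tabella_spec : Claim_equal_n_righe_tabella := by
  intro tabella _ pre
  unfold Spec_n_righe_tabella
  match tabella with
  | [] => exact absurd rfl pre.1
  | (k, v) :: rest =>
    have hpre : ∀ kv ∈ rest, kv.2.length = v.length := by
      intro kv hkv
      simpa using pre.2 kv (by simp [hkv])
    have hA : n_righe_tabella ((k, v) :: rest) = (v.length : Int) := by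
      unfold n_righe_tabella
      rw [show nrtAux none ((k, v) :: rest) = nrtAux (some (v.length : Int)) rest from rfl]
      rw [nrtAux_const (v.length : Int) rest (fun kv hkv => by rw [hpre kv hkv])]
      rfl
    have hB : n_righe_tabella_alt ((k, v) :: rest) = (v.length : Int) := by
      unfold n_righe_tabella_alt
      simp only [List.map_cons]
      have hofList : PySem.Set.ofList ((v.length : Int) :: rest.map (fun kv => (kv.2.length : Int)))
          = [(v.length : Int)] := by
        rw [PySem.Set.ofList_eq_foldl]
        simp only [List.foldl_cons]
        have h0 : PySem.Set.add [] (v.length : Int) = [(v.length : Int)] := by rfl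
        rw [h0]
        exact foldl_add_const _ _ (by
          intro x hx
          simp only [List.mem_map] at hx
          obtain ⟨kv, hkv, hx⟩ := hx
          rw [← hx, hpre kv hkv])
      rw [hofList]
      rfl
    rw [hA, hB]
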